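-- pv_equiv track=rewrite | github.com/ruben210698/Project_TFM_Dummy | visualizacion/grafico14.py | loop_reducir_posiciones_finales_eje_x
-- ===== SOURCE A (Python) =====
-- def loop_reducir_posiciones_finales_eje_x(posiciones_finales, cambiado):
--     ultima_x_leida = 0
--     dim_x_reducir = 0
--     i = -1
--     posiciones_finales_loop = posiciones_finales.copy()
--     cambiado = False
--     for palabra, posicion in posiciones_finales_loop.items():
--         i += 1
--         pos_x_actual = posicion[0]
--         if (pos_x_actual - ultima_x_leida) > 15:
--             dim_x_reducir += (pos_x_actual - ultima_x_leida - 15)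
--         if dim_x_reducir > 0:
--             nueva_pos_x = pos_x_actual - dim_x_reducir
--             posiciones_finales.update({palabra: (nueva_pos_x, posicion[1])})
--             cambiado = True
--         ultima_x_leida = pos_x_actual
--     return posiciones_finales, cambiado
-- ===== SOURCE B (Python) =====
-- def loop_reducir_posiciones_finales_eje_x(posiciones_finales, cambiado):
--     # Pass 1: record, per word, the cumulative x-reduction applicable to it.
--     reducciones = []
--     ultima_x = 0
--     acumulado = 0
--     for palabra, posicion in posiciones_finales.items():
--         gap = posicion[0] - ultima_x
--         if gap > 15:
--             acumulado += gap - 15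
--         reducciones.append((palabra, posicion, acumulado))
--         ultima_x = posicion[0]
--     # Pass 2: apply the recorded reductions in place.
--     cambiado = False
--     for palabra, posicion, red in reducciones:
--         if red > 0:
--             posiciones_finales[palabra] = (posicion[0] - red, posicion[1])
--             cambiado = True
--     return posiciones_finales, cambiado
-- ===== Notes on version B (the rewrite author's own statement) =====
-- stated objective: alternative
-- what changed: Splits A's single interleaved loop into two passes: a first pass that only computes and records the cumulative gap reduction per word, and a second pass that applies the recorded reductions to the dict and sets the changed flag.
import Mathlib
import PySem

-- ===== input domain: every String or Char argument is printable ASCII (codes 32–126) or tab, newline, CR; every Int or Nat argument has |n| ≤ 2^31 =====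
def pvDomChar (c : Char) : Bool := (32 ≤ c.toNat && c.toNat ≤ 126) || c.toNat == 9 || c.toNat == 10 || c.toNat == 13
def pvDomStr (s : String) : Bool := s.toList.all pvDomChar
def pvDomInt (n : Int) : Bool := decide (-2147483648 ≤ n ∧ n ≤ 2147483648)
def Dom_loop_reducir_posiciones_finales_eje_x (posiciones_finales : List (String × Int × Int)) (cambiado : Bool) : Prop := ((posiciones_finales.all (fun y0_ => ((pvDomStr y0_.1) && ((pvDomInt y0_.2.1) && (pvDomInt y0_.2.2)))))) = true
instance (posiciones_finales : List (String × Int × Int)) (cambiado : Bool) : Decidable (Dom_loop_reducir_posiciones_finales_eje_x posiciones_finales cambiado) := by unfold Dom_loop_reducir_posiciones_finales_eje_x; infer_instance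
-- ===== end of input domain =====

-- B rewrites A's single interleaved loop as two passes (record cumulative reductions, then apply);
-- both mutate the input dict in place in Python — the equivalence proved here is about the return value.

-- ===== PORT A =====
-- loop body of A; state = (dict, ultima_x_leida, dim_x_reducir, cambiado);
-- the unused counter `i` of A is dead code and not carried.
def lrpx_stepA (st : PySem.Dict String (Int × Int) × Int × Int × Bool) (item : String × Int × Int) :
    PySem.Dict String (Int × Int) × Int × Int × Bool :=
  let pos_x_actual := item.2.1
  let dim_x_reducir := if pos_x_actual - st.2.1 > 15
    then st.2.2.1 + (pos_x_actual - st.2.1 - 15) else st.2.2.1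
  if dim_x_reducir > 0 then
    (st.1.insert item.1 (pos_x_actual - dim_x_reducir, item.2.2), pos_x_actual, dim_x_reducir, true)
  else
    (st.1, pos_x_actual, dim_x_reducir, st.2.2.2)

def loop_reducir_posiciones_finales_eje_x (posiciones_finales : List (String × Int × Int)) (cambiado : Bool) : (List (String × Int × Int)) × Bool :=
  let fin := posiciones_finales.foldl lrpx_stepA (PySem.Dict.mk posiciones_finales, 0, 0, false)
  (fin.1.items, fin.2.2.2)

-- ===== PORT B =====
-- pass 1 of Source B: record (palabra, posicion, cumulative reduction) for every item
def lrpx_reducciones : List (String × Int × Int) → Int → Int → List (String × (Int × Int) × Int)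
  | [], _, _ => []
  | (palabra, posicion) :: rest, ultima_x, acumulado =>
    let gap := posicion.1 - ultima_x
    let acumulado := if gap > 15 then acumulado + (gap - 15) else acumulado
    (palabra, posicion, acumulado) :: lrpx_reducciones rest posicion.1 acumulado

-- loop body of pass 2 of Source B
def lrpx_stepB (st : PySem.Dict String (Int × Int) × Bool) (t : String × (Int × Int) × Int) :
    PySem.Dict String (Int × Int) × Bool :=
  if t.2.2 > 0 then (st.1.insert t.1 (t.2.1.1 - t.2.2, t.2.1.2), true) else st

def loop_reducir_posiciones_finales_eje_x_alt (posiciones_finales : List (String × Int × Int)) (cambiado : Bool) : (List (String × Int × Int)) × Bool :=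
  let fin := (lrpx_reducciones posiciones_finales 0 0).foldl lrpx_stepB
    (PySem.Dict.mk posiciones_finales, false)
  (fin.1.items, fin.2)

-- ===== PRECONDITION & SPEC =====
def Spec_loop_reducir_posiciones_finales_eje_x (posiciones_finales : List (String × Int × Int)) (cambiado : Bool) (out : (List (String × Int × Int)) × Bool) : Prop := out = loop_reducir_posiciones_finales_eje_x_alt posiciones_finales cambiado
instance (posiciones_finales : List (String × Int × Int)) (cambiado : Bool) (out : (List (String × Int × Int)) × Bool) : Decidable (Spec_loop_reducir_posiciones_finales_eje_x posiciones_finales cambiado out) := by unfold Spec_loop_reducir_posiciones_finales_eje_x; infer_instance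

-- ===== CLAIM (what is proved, stated in full; the proofs are below) =====
def Claim_equal_loop_reducir_posiciones_finales_eje_x : Prop := ∀ (posiciones_finales : List (String × Int × Int)) (cambiado : Bool), Dom_loop_reducir_posiciones_finales_eje_x posiciones_finales cambiado → Spec_loop_reducir_posiciones_finales_eje_x posiciones_finales cambiado (loop_reducir_posiciones_finales_eje_x posiciones_finales cambiado)

-- ===== LEMMAS AND PROOFS =====

-- A's fold over any item list from state (d, u, r, c) produces, in its dict and flag
-- components, exactly B's second pass over the reductions recorded from (u, r), from (d, c).
theorem lrpx_fold_eq (xs : List (String × Int × Int)) :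
    ∀ (d : PySem.Dict String (Int × Int)) (u r : Int) (c : Bool),
    ((xs.foldl lrpx_stepA (d, u, r, c)).1, (xs.foldl lrpx_stepA (d, u, r, c)).2.2.2)
      = (lrpx_reducciones xs u r).foldl lrpx_stepB (d, c) := by
  induction xs with
  | nil => intro d u r c; simp [lrpx_reducciones]
  | cons hd tl ih =>
    intro d u r c
    obtain ⟨palabra, posicion⟩ := hd
    simp only [List.foldl_cons, lrpx_reducciones]
    by_cases h : (if posicion.1 - u > 15 then r + (posicion.1 - u - 15) else r) > 0
    · simp only [lrpx_stepA, lrpx_stepB, h]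
      exact ih _ _ _ _
    · simp only [lrpx_stepA, lrpx_stepB, h]
      exact ih _ _ _ _

-- ===== VERDICT (by name: the statement is the Claim_ definition above) =====
theorem loop_reducir_posiciones_finales_eje_x_spec : Claim_equal_loop_reducir_posiciones_finales_eje_x := by
  intro posiciones_finales cambiado _
  unfold Spec_loop_reducir_posiciones_finales_eje_x
  unfold loop_reducir_posiciones_finales_eje_x loop_reducir_posiciones_finales_eje_x_alt
  have h := lrpx_fold_eq posiciones_finales (PySem.Dict.mk posiciones_finales) 0 0 false
  have h1 := congrArg Prod.fst h
  have h2 := congrArg Prod.snd h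
  simp only at h1 h2
  simp only [h1, h2]
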